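-- pv_equiv track=rewrite | github.com/sarangspadalkar/Weird-Encoder | weirdTextEncoder.py | weirdTextEncoder
-- ===== SOURCE A (Python) =====
-- def weirdTextEncoder(textNum):
--
--     totalBits = 32
--     lengthEachBit = 8
--
--     ascii_arr = []
--
--     ## Conversion of the string into ASCII array
--     for s in textNum:
--         len_bit = len(bin(ord(s)).replace("0b",""))
--         if len_bit < lengthEachBit:
--             binValue = '0'*(lengthEachBit-len_bit)+bin(ord(s)).replace("0b","")
--         else:
--             binValue = bin(ord(s)).replace("0b","")
--         ascii_arr.extend([bit for bit in reversed(binValue)])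
--
--     if len(ascii_arr) < totalBits:
--         k = (totalBits-len(ascii_arr))
--         while k > 0:
--             ascii_arr += ["0"]
--             k -=1
--
--     ## Reversing the array to get it into correct format.
--     ascii_arr = ascii_arr[::-1]
--
--     ## Designing the Encoded array from the ascii array.
--     encoded_arr = []
--     for i in range (lengthEachBit):
--         j = i
--         while j < totalBits:
--             encoded_arr.append(ascii_arr[j])
--             j+=8
--
--     ## Calculating the Decimal Output (Final Result)
--     encoded_output = 0
--     for x in range(len(encoded_arr)):
--         encoded_output+= (2**(31-x))*int(encoded_arr[x])
--
--     return encoded_output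
-- ===== SOURCE B (Python) =====
-- def weirdTextEncoder(textNum):
--     # Pack the characters as a little-endian byte stream into one integer,
--     # then assemble the stride-8 permuted 32-bit result with shifts and masks.
--     acc = int.from_bytes(textNum.encode('ascii'), 'little')
--     L = max(8 * len(textNum), 32)
--     out = 0
--     for i in range(8):
--         for t in range(4):
--             out += ((acc >> (L - 1 - (i + 8 * t))) & 1) << (31 - (4 * i + t))
--     return out
-- ===== Notes on version B (the rewrite author's own statement) =====
-- stated objective: faster
-- what changed: Replaces the list-of-bit-string pipeline (per-char binary strings, padded char list, list reversal, permutation into a second list, weighted-sum loop) by integer bit arithmetic: pack the string as a little-endian integer via int.from_bytes, then assemble the permuted 32-bit result directly with 32 shift-and-mask operations.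
import Mathlib
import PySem

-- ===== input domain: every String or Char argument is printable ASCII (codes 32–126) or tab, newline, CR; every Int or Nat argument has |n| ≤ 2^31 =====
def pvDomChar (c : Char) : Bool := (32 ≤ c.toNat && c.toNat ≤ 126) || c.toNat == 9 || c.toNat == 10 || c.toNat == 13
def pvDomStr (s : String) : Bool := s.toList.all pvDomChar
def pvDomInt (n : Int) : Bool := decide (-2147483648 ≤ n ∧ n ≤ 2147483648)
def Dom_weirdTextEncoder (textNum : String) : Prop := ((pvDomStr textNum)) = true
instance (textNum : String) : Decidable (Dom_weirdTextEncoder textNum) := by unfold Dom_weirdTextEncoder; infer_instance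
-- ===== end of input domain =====

-- B replaces A's list-of-bit-strings pipeline by direct integer bit arithmetic (little-endian packing, then 32 shift-and-mask reads); a timing run measured B faster.

-- ===== PORT A =====
-- bin(n).replace("0b","") : binary digits of n, MSB first (bin(0) = "0").
-- The fuel argument (first) only makes the recursion structural; fuel = n is always enough.
def natBinAux : Nat → Nat → List Char
  | 0, n => [Char.ofNat (48 + n % 2)]
  | fuel + 1, n =>
    if n < 2 then [Char.ofNat (48 + n)]
    else natBinAux fuel (n / 2) ++ [Char.ofNat (48 + n % 2)]

def natBin (n : Nat) : List Char := natBinAux n n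

-- one iteration of A's first for-loop body: the list extended onto ascii_arr for character s
def pyA_charBits (s : Char) : List Char :=
  let bv := natBin s.toNat
  let binValue := if bv.length < 8 then List.replicate (8 - bv.length) '0' ++ bv else bv
  binValue.reverse

-- A's inner 'while j < totalBits: append ascii_arr[j]; j += 8' (the index is always in range: the array was padded to length ≥ 32)
def encJ (arr : List Char) (j : Nat) (acc : List Char) : List Char :=
  if j < 32 then encJ arr (j + 8) (acc ++ [(PySem.List.pyGet? arr (j : Int)).getD '0']) else acc
termination_by 32 - j

def weirdTextEncoder (textNum : String) : Int :=
  let ascii0 := textNum.toList.foldl (fun a s => a ++ pyA_charBits s) []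
  -- 'while k > 0: ascii_arr += ["0"]'
  let ascii1 := if ascii0.length < 32 then
      (List.range (32 - ascii0.length)).foldl (fun a _ => a ++ ['0']) ascii0
    else ascii0
  let ascii2 := ascii1.reverse   -- ascii_arr[::-1]
  let encoded := (List.range 8).foldl (fun a i => encJ ascii2 i a) []
  -- 2**(31-x): x < 32 always since encoded has exactly 32 entries; int(bit-char) = code point - 48
  (List.range encoded.length).foldl
    (fun s x => s + (2 : Int) ^ ((31 - x : Nat)) * ((((PySem.List.pyGet? encoded (x : Int)).getD '0').toNat : Int) - 48)) 0

-- ===== PORT B =====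
def weirdTextEncoder_alt (textNum : String) : Int :=
  -- int.from_bytes(textNum.encode('ascii'), 'little'): the little-endian base-256 value of the
  -- code points (exact on the ASCII domain; encode('ascii') is the identity byte per character there)
  let acc := textNum.toList.foldr (fun c v => c.toNat + 256 * v) 0
  let L := max (8 * textNum.toList.length) 32
  let out := (List.range 8).foldl (fun o i =>
      (List.range 4).foldl (fun o t =>
        o + ((acc >>> (L - 1 - (i + 8 * t))) &&& 1) <<< (31 - (4 * i + t))) o) 0
  (out : Int)

-- ===== PRECONDITION & SPEC =====
def Spec_weirdTextEncoder (textNum : String) (out : Int) : Prop := out = weirdTextEncoder_alt textNum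
instance (textNum : String) (out : Int) : Decidable (Spec_weirdTextEncoder textNum out) := by unfold Spec_weirdTextEncoder; infer_instance

-- ===== CLAIM (what is proved, stated in full; the proofs are below) =====
def Claim_equal_weirdTextEncoder : Prop := ∀ (textNum : String), Dom_weirdTextEncoder textNum → Spec_weirdTextEncoder textNum (weirdTextEncoder textNum)

-- ===== LEMMAS AND PROOFS =====

-- bit k of v, as the character A's pipeline carries
def bitC (v k : Nat) : Char := if v / 2 ^ k % 2 = 1 then '1' else '0'

-- little-endian value of the character list (ord c₀ + 256·(…))
def packV : List Char → Nat
  | [] => 0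
  | c :: cs => c.toNat + 256 * packV cs

-- the common normal form both ports are reduced to
def spec32 (v L : Nat) : Nat :=
  (List.range 8).foldl (fun o i =>
    (List.range 4).foldl (fun o t =>
      o + v / 2 ^ (L - 1 - (i + 8 * t)) % 2 * 2 ^ (31 - (4 * i + t))) o) 0

-- the value A reads at index j of an array of length ≥ 32
def gIx (arr : List Char) (j : Nat) : Char := (PySem.List.pyGet? arr (j : Int)).getD '0'

theorem charBits_eq : ∀ n < 128, pyA_charBits (Char.ofNat n) = (List.range 8).map (bitC n) := by decide

theorem charBits_eq' (c : Char) (h : c.toNat < 128) :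
    pyA_charBits c = (List.range 8).map (bitC c.toNat) := by
  have := charBits_eq c.toNat h
  rwa [Char.ofNat_toNat] at this

theorem bit_low (a b j : Nat) (hj : j < 8) :
    (a + 256 * b) / 2 ^ j % 2 = a / 2 ^ j % 2 := by
  interval_cases j <;> norm_num <;> omega

theorem bit_high (a b j : Nat) (ha : a < 256) (hj : 8 ≤ j) :
    (a + 256 * b) / 2 ^ j % 2 = b / 2 ^ (j - 8) % 2 := by
  have h2 : 2 ^ j = 256 * 2 ^ (j - 8) := by
    calc 2 ^ j = 2 ^ (8 + (j - 8)) := by congr 1; omega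
    _ = 256 * 2 ^ (j - 8) := by rw [pow_add]; norm_num
  rw [h2, ← Nat.div_div_eq_div_mul]
  have h3 : (a + 256 * b) / 256 = b := by omega
  rw [h3]

theorem bit_top (v k j : Nat) (hv : v < 2 ^ k) (hj : k ≤ j) : v / 2 ^ j % 2 = 0 := by
  rw [Nat.div_eq_of_lt (lt_of_lt_of_le hv (Nat.pow_le_pow_right (by norm_num) hj))]

theorem packV_lt (cs : List Char) (h : ∀ c ∈ cs, c.toNat < 256) :
    packV cs < 2 ^ (8 * cs.length) := by
  induction cs with
  | nil => simp [packV]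
  | cons c cs ih =>
    have hc := h c (by simp)
    have ht := ih (fun x hx => h x (by simp [hx]))
    have hp : 2 ^ (8 * (c :: cs).length) = 256 * 2 ^ (8 * cs.length) := by
      rw [List.length_cons, Nat.mul_succ, pow_add]; ring
    simp only [packV]
    omega

theorem flat_len (cs : List Char) (h : ∀ c ∈ cs, c.toNat < 128) :
    (cs.flatMap pyA_charBits).length = 8 * cs.length := by
  induction cs with
  | nil => simp
  | cons c cs ih =>
    rw [List.flatMap_cons, List.length_append, charBits_eq' c (h c (by simp)),
        ih (fun x hx => h x (by simp [hx]))]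
    simp; omega

theorem flat_get (cs : List Char) (h : ∀ c ∈ cs, c.toNat < 128) :
    ∀ j, j < 8 * cs.length → (cs.flatMap pyA_charBits)[j]? = some (bitC (packV cs) j) := by
  induction cs with
  | nil => intro j hj; simp at hj
  | cons c cs ih =>
    intro j hj
    have hc : c.toNat < 128 := h c (by simp)
    have hlen : (pyA_charBits c).length = 8 := by rw [charBits_eq' c hc]; simp
    rw [List.flatMap_cons]
    by_cases hj8 : j < 8
    · rw [List.getElem?_append_left (by omega)]
      rw [charBits_eq' c hc]
      rw [List.getElem?_map, List.getElem?_range hj8]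
      simp only [Option.map_some]
      have : bitC c.toNat j = bitC (packV (c :: cs)) j := by
        simp only [bitC, packV, bit_low c.toNat (packV cs) j hj8]
      rw [this]
    · rw [List.getElem?_append_right (by omega)]
      rw [hlen, ih (fun x hx => h x (by simp [hx])) (j - 8) (by simp at hj ⊢; omega)]
      have : bitC (packV cs) (j - 8) = bitC (packV (c :: cs)) j := by
        simp only [bitC, packV, bit_high c.toNat (packV cs) j (by omega) (by omega)]
      rw [this]

theorem pad_eq (k : Nat) (a : List Char) :
    (List.range k).foldl (fun a _ => a ++ ['0']) a = a ++ List.replicate k '0' := by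
  induction k with
  | zero => simp
  | succ k ih =>
    rw [List.range_succ, List.foldl_append, ih]
    simp [List.replicate_succ']

theorem ascii2_get (cs : List Char) (h : ∀ c ∈ cs, c.toNat < 128) (j : Nat) (hj : j < 32) :
    gIx ((if (cs.flatMap pyA_charBits).length < 32 then
            (cs.flatMap pyA_charBits) ++ List.replicate (32 - (cs.flatMap pyA_charBits).length) '0'
          else (cs.flatMap pyA_charBits)).reverse) j
      = bitC (packV cs) (max (8 * cs.length) 32 - 1 - j) := by
  have hFlen := flat_len cs h
  have hv := packV_lt cs (fun c hc => by have := h c hc; omega)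
  by_cases hc : 8 * cs.length < 32
  · rw [if_pos (by omega)]
    have hPlen : ((cs.flatMap pyA_charBits) ++ List.replicate (32 - (cs.flatMap pyA_charBits).length) '0').length = 32 := by
      simp [hFlen]; omega
    unfold gIx
    rw [PySem.List.pyGet?_natCast, List.getElem?_reverse (by omega), hPlen]
    have hmax : max (8 * cs.length) 32 = 32 := by omega
    rw [hmax]
    by_cases hin : 32 - 1 - j < 8 * cs.length
    · rw [List.getElem?_append_left (by omega), flat_get cs h _ hin]
      rfl
    · rw [List.getElem?_append_right (by omega)]
      rw [List.getElem?_replicate]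
      rw [if_pos (by simp [hFlen]; omega)]
      have : bitC (packV cs) (32 - 1 - j) = '0' := by
        simp only [bitC, bit_top (packV cs) (8 * cs.length) (32 - 1 - j) hv (by omega)]
        simp
      rw [this]
      rfl
  · rw [if_neg (by omega)]
    unfold gIx
    rw [PySem.List.pyGet?_natCast, List.getElem?_reverse (by omega), hFlen]
    have hmax : max (8 * cs.length) 32 = 8 * cs.length := by omega
    rw [hmax, flat_get cs h _ (by omega)]
    rfl

theorem encJ_step (arr : List Char) (j : Nat) (acc : List Char) (h : j < 32) :
    encJ arr j acc = encJ arr (j + 8) (acc ++ [(PySem.List.pyGet? arr (j : Int)).getD '0']) := by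
  rw [encJ]; simp [h]

theorem encJ_stop (arr : List Char) (j : Nat) (acc : List Char) (h : ¬ j < 32) :
    encJ arr j acc = acc := by
  rw [encJ]; simp [h]

theorem encJ_eval (arr : List Char) (i : Nat) (acc : List Char) (h : i < 8) :
    encJ arr i acc = acc ++ [gIx arr i, gIx arr (i + 8), gIx arr (i + 8 + 8), gIx arr (i + 8 + 8 + 8)] := by
  rw [encJ_step _ _ _ (by omega), encJ_step _ _ _ (by omega), encJ_step _ _ _ (by omega),
      encJ_step _ _ _ (by omega), encJ_stop _ _ _ (by omega)]
  simp [gIx]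

theorem bitVal (v k : Nat) : (((bitC v k).toNat : Int) - 48) = ((v / 2 ^ k % 2 : Nat) : Int) := by
  unfold bitC
  rcases Nat.mod_two_eq_zero_or_one (v / 2 ^ k) with h | h <;> simp [h]

theorem fold_idx (E : List Char) :
    (List.range E.length).foldl
        (fun s x => s + (2 : Int) ^ ((31 - x : Nat)) * ((((PySem.List.pyGet? E (x : Int)).getD '0').toNat : Int) - 48)) 0
      = (E.zipIdx).foldl (fun s cx => s + (2 : Int) ^ ((31 - cx.2 : Nat)) * (((cx.1.toNat : Int)) - 48)) 0 := by
  suffices hgen : ∀ (init : Int),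
      (List.range E.length).foldl
          (fun s x => s + (2 : Int) ^ ((31 - x : Nat)) * ((((PySem.List.pyGet? E (x : Int)).getD '0').toNat : Int) - 48)) init
        = (E.zipIdx).foldl (fun s cx => s + (2 : Int) ^ ((31 - cx.2 : Nat)) * (((cx.1.toNat : Int)) - 48)) init from
    hgen 0
  induction E using List.reverseRecOn with
  | nil => intro init; simp
  | append_singleton E c ih =>
    intro init
    rw [List.length_append, List.length_singleton, List.range_succ, List.foldl_append,
        List.zipIdx_append, List.foldl_append]
    have hcongr :
        List.foldl
            (fun s x => s + (2 : Int) ^ ((31 - x : Nat)) * ((((PySem.List.pyGet? (E ++ [c]) (x : Int)).getD '0').toNat : Int) - 48))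
            init (List.range E.length)
          = List.foldl
            (fun s x => s + (2 : Int) ^ ((31 - x : Nat)) * ((((PySem.List.pyGet? E (x : Int)).getD '0').toNat : Int) - 48))
            init (List.range E.length) := by
      refine PySem.List.foldl_congr_mem _ _ _ _ ?_
      intro acc x hx
      have hxlt : x < E.length := List.mem_range.mp hx
      rw [PySem.List.pyGet?_natCast, PySem.List.pyGet?_natCast, List.getElem?_append_left hxlt]
    rw [hcongr, ih]
    simp only [List.foldl_cons, List.foldl_nil, List.zipIdx_singleton]
    rw [PySem.List.pyGet?_append_length]
    simp

theorem packV_eq_foldr (cs : List Char) :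
    cs.foldr (fun c v => c.toNat + 256 * v) 0 = packV cs := by
  induction cs with
  | nil => rfl
  | cons c cs ih => simp [packV, ih]

theorem B_eval (s : String) :
    weirdTextEncoder_alt s = ((spec32 (packV s.toList) (max (8 * s.toList.length) 32) : Nat) : Int) := by
  unfold weirdTextEncoder_alt
  rw [packV_eq_foldr s.toList]
  simp only [spec32, Nat.shiftRight_eq_div_pow, Nat.and_one_is_mod, Nat.shiftLeft_eq]

set_option maxHeartbeats 4000000 in
theorem A_eval (s : String) (h : ∀ c ∈ s.toList, c.toNat < 128) :
    weirdTextEncoder s = ((spec32 (packV s.toList) (max (8 * s.toList.length) 32) : Nat) : Int) := by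
  have hflat : s.toList.foldl (fun a c => a ++ pyA_charBits c) ([] : List Char)
      = s.toList.flatMap pyA_charBits := by
    rw [PySem.List.foldl_append_eq_flatMap, List.nil_append]
  simp only [weirdTextEncoder, hflat, pad_eq]
  rw [fold_idx]
  have hget := ascii2_get s.toList h
  rw [show List.range 8 = [0, 1, 2, 3, 4, 5, 6, 7] from rfl]
  simp only [List.foldl_cons, List.foldl_nil]
  rw [encJ_eval _ _ _ (by norm_num), encJ_eval _ _ _ (by norm_num), encJ_eval _ _ _ (by norm_num),
      encJ_eval _ _ _ (by norm_num), encJ_eval _ _ _ (by norm_num), encJ_eval _ _ _ (by norm_num),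
      encJ_eval _ _ _ (by norm_num), encJ_eval _ _ _ (by norm_num)]
  simp only [List.nil_append, List.cons_append]
  simp only [Nat.reduceAdd]
  rw [hget 0 (by norm_num), hget 8 (by norm_num), hget 16 (by norm_num), hget 24 (by norm_num),
      hget 1 (by norm_num), hget 9 (by norm_num), hget 17 (by norm_num), hget 25 (by norm_num),
      hget 2 (by norm_num), hget 10 (by norm_num), hget 18 (by norm_num), hget 26 (by norm_num),
      hget 3 (by norm_num), hget 11 (by norm_num), hget 19 (by norm_num), hget 27 (by norm_num),
      hget 4 (by norm_num), hget 12 (by norm_num), hget 20 (by norm_num), hget 28 (by norm_num),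
      hget 5 (by norm_num), hget 13 (by norm_num), hget 21 (by norm_num), hget 29 (by norm_num),
      hget 6 (by norm_num), hget 14 (by norm_num), hget 22 (by norm_num), hget 30 (by norm_num),
      hget 7 (by norm_num), hget 15 (by norm_num), hget 23 (by norm_num), hget 31 (by norm_num)]
  simp only [List.zipIdx_cons, List.zipIdx_nil, List.foldl_cons, List.foldl_nil]
  norm_num
  simp only [bitVal]
  simp only [spec32, show List.range 8 = [0, 1, 2, 3, 4, 5, 6, 7] from rfl,
    show List.range 4 = [0, 1, 2, 3] from rfl, List.foldl_cons, List.foldl_nil]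
  push_cast
  norm_num
  ring

theorem dom_chars (s : String) (h : Dom_weirdTextEncoder s) : ∀ c ∈ s.toList, c.toNat < 128 := by
  intro c hc
  unfold Dom_weirdTextEncoder pvDomStr at h
  have := List.all_eq_true.mp h c hc
  simp [pvDomChar] at this
  omega

-- ===== VERDICT (by name: the statement is the Claim_ definition above) =====
theorem weirdTextEncoder_spec : Claim_equal_weirdTextEncoder := by
  intro s hDom
  unfold Spec_weirdTextEncoder
  rw [A_eval s (dom_chars s hDom), B_eval s]
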